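-- pv_equiv track=rewrite | github.com/LPELCRACK896/CC_project1 | YAPL3/mips_functions.py | find_last_usage_temporary
-- ===== SOURCE A (Python) =====
-- def find_last_usage_temporary(current_line, temporary_var, block_context):
--     line = None
--     start_search = False
--     for ln in block_context:
--         if not start_search:
--             start_search = ln == current_line
--         else:
--             if temporary_var in ln:
--                 line = ln
--     return line
-- ===== SOURCE B (Python) =====
-- def find_last_usage_temporary(current_line, temporary_var, block_context):
--     lines = list(block_context)
--     try:
--         i = lines.index(current_line)
--     except ValueError:
--         return None
--     for ln in reversed(lines[i + 1:]):
--         if temporary_var in ln: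
--             return ln
--     return None
-- ===== Notes on version B (the rewrite author's own statement) =====
-- stated objective: alternative
-- what changed: Replaces the forward flag-and-keep-last accumulation with locating the first index of current_line and then scanning the suffix in reverse, returning on the first line containing temporary_var.
import Mathlib
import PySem

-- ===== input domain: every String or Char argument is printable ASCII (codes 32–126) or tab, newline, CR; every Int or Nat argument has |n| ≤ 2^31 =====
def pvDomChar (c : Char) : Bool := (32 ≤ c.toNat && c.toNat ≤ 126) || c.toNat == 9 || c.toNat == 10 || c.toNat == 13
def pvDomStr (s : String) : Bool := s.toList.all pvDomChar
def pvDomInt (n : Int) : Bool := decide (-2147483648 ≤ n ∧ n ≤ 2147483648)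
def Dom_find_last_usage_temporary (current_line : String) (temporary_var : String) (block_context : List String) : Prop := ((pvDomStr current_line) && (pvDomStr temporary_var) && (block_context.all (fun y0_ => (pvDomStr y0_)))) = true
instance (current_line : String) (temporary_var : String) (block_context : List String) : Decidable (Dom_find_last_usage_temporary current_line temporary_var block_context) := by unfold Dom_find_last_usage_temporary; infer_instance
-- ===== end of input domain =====

-- B replaces A's forward flag-and-keep-last scan by an index-of-current-line then a
-- reverse scan of the suffix with early return (alternative decomposition, same cost).

-- ===== PORT A =====
-- one loop step of A: state = (line, start_search)
def fluStepA (current_line temporary_var : String) (st : Option String × Bool) (ln : String) : Option String × Bool :=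
  if !st.2 then (st.1, ln == current_line)
  else if PySem.Str.isIn temporary_var ln then (some ln, true)
  else st

def find_last_usage_temporary (current_line : String) (temporary_var : String) (block_context : List String) : Option String :=
  (block_context.foldl (fluStepA current_line temporary_var) (none, false)).1

-- ===== PORT B =====
def find_last_usage_temporary_alt (current_line : String) (temporary_var : String) (block_context : List String) : Option String :=
  match PySem.List.index? block_context current_line with
  | none => none
  | some i =>
      ((PySem.List.slice block_context (some ((i : Int) + 1)) none).reverse).find?
        (fun ln => PySem.Str.isIn temporary_var ln)

-- ===== PRECONDITION & SPEC =====
def Spec_find_last_usage_temporary (current_line : String) (temporary_var : String) (block_context : List String) (out : Option String) : Prop := out = find_last_usage_temporary_alt current_line temporary_var block_context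
instance (current_line : String) (temporary_var : String) (block_context : List String) (out : Option String) : Decidable (Spec_find_last_usage_temporary current_line temporary_var block_context out) := by unfold Spec_find_last_usage_temporary; infer_instance

-- ===== CLAIM (what is proved, stated in full; the proofs are below) =====
def Claim_equal_find_last_usage_temporary : Prop := ∀ (current_line : String) (temporary_var : String) (block_context : List String), Dom_find_last_usage_temporary current_line temporary_var block_context → Spec_find_last_usage_temporary current_line temporary_var block_context (find_last_usage_temporary current_line temporary_var block_context)

-- ===== LEMMAS AND PROOFS =====

-- while the flag is false and current_line has not been seen, the state is unchanged
theorem fluA_false_phase (cl tv : String) (acc : Option String) (l : List String)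
    (h : cl ∉ l) :
    l.foldl (fluStepA cl tv) (acc, false) = (acc, false) := by
  induction l generalizing acc with
  | nil => rfl
  | cons x l ih =>
    simp only [List.mem_cons, not_or] at h
    have hx : (x == cl) = false := by simpa [beq_iff_eq] using (fun e => h.1 e.symm)
    simp [List.foldl, fluStepA, hx, ih acc h.2]

-- once the flag is true, the fold keeps the last matching line = first match of the reverse
theorem fluA_true_phase (cl tv : String) (acc : Option String) (l : List String) :
    l.foldl (fluStepA cl tv) (acc, true)
      = ((l.reverse.find? (fun ln => PySem.Str.isIn tv ln)).or acc, true) := by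
  induction l generalizing acc with
  | nil => rfl
  | cons x l ih =>
    by_cases hx : PySem.Chars.isIn tv.toList x.toList = true
    · simp [List.foldl, fluStepA, hx, ih, List.find?_append]
    · simp [List.foldl, fluStepA, hx, ih, List.find?_append]

-- ===== VERDICT (by name: the statement is the Claim_ definition above) =====
theorem find_last_usage_temporary_spec : Claim_equal_find_last_usage_temporary := by
  intro cl tv bc _
  unfold Spec_find_last_usage_temporary find_last_usage_temporary find_last_usage_temporary_alt
  cases hidx : PySem.List.index? bc cl with
  | none =>
    have hnm : cl ∉ bc := (PySem.List.index?_eq_none_iff _ _).mp hidx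
    simp [fluA_false_phase cl tv none bc hnm]
  | some i =>
    obtain ⟨pre, suf, hbc, hlen, hnp⟩ := (PySem.List.index?_eq_some_iff _ _ _).mp hidx
    subst hbc
    have hslice : PySem.List.slice (pre ++ cl :: suf) (some ((i : Int) + 1)) none
        = suf := by
      have : ((i : Int) + 1) = ((i + 1 : Nat) : Int) := by push_cast; ring
      rw [this, PySem.List.slice_from_natCast]
      simp [← hlen]
    rw [List.foldl_append, fluA_false_phase cl tv none pre hnp]
    simp [List.foldl, fluStepA, fluA_true_phase, hslice]
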